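-- pv_equiv track=rewrite | github.com/arthurmohn/processoseletivosyngenta | src/my_module.py | get_stay_cost
-- ===== SOURCE A (Python) =====
-- weekend = ['sat', 'sun']
--
-- hotel_values_rewards = {"Lakewood": [80, 80], "Bridgewood": [110, 50], "Ridgewood": [100, 40]}
--
-- hotel_values_regular = {"Lakewood": [110, 90], "Bridgewood": [160, 60], "Ridgewood": [220, 150]}
--
-- def get_stay_cost(week_date, fidelity_program):       # calculating the value of the stay in each hotel, with fidelity program and without it
--     total_Lakewood = 0
--     total_Bridgewood = 0
--     total_Ridgewood = 0
--
--     for day in week_date: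
--         if(fidelity_program == "Rewards"):
--             if day in weekend:
--                 total_Lakewood += hotel_values_rewards["Lakewood"][1]
--                 total_Bridgewood += hotel_values_rewards["Bridgewood"][1]
--                 total_Ridgewood += hotel_values_rewards["Ridgewood"][1]
--
--             else:
--                 total_Lakewood += hotel_values_rewards["Lakewood"][0]
--                 total_Bridgewood += hotel_values_rewards["Bridgewood"][0]
--                 total_Ridgewood += hotel_values_rewards["Ridgewood"][0]
--
--         else:
--             if day in weekend:
--                 total_Lakewood += hotel_values_regular["Lakewood"][1]
--                 total_Bridgewood += hotel_values_regular["Bridgewood"][1]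
--                 total_Ridgewood += hotel_values_regular["Ridgewood"][1]
--
--             else:
--                 total_Lakewood += hotel_values_regular["Lakewood"][0]
--                 total_Bridgewood += hotel_values_regular["Bridgewood"][0]
--                 total_Ridgewood += hotel_values_regular["Ridgewood"][0]
--
--     values = {"Lakewood": total_Lakewood, "Bridgewood": total_Bridgewood, "Ridgewood": total_Ridgewood}     # dictionaty with the name and the value of each hotel
--
--     return values
-- ===== SOURCE B (Python) =====
-- weekend = ['sat', 'sun']
--
-- hotel_values_rewards = {"Lakewood": [80, 80], "Bridgewood": [110, 50], "Ridgewood": [100, 40]}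
--
-- hotel_values_regular = {"Lakewood": [110, 90], "Bridgewood": [160, 60], "Ridgewood": [220, 150]}
--
-- def get_stay_cost(week_date, fidelity_program):
--     # pick the rate table once, count weekend days once, then closed-form totals
--     rates = hotel_values_rewards if fidelity_program == "Rewards" else hotel_values_regular
--     weekend_days = sum(1 for day in week_date if day in weekend)
--     weekday_days = len(week_date) - weekend_days
--     return {name: wk * weekday_days + we * weekend_days for name, (wk, we) in rates.items()}
-- ===== Notes on version B (the rewrite author's own statement) =====
-- stated objective: simpler
-- what changed: B selects the rate table once and counts weekend days in a single pass, then computes each hotel's total in closed form (rate_weekday*weekday_days + rate_weekend*weekend_days) via a dict comprehension, instead of A's per-day branch updating three running totals.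
import Mathlib
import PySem

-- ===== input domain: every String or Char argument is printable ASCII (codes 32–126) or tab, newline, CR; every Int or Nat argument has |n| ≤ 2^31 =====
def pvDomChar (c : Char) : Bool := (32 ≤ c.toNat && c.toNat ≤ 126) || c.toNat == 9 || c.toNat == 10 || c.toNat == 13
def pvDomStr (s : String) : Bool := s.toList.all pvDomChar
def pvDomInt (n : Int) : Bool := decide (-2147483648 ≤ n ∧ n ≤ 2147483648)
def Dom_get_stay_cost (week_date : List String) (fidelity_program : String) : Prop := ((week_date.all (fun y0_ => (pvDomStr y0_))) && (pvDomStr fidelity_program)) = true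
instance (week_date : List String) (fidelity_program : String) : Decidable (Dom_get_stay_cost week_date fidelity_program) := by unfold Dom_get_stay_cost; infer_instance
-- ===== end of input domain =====

-- B picks the rate table once and counts weekend days once, then computes each total in closed form (simpler decomposition; same cost).

-- ===== PORT A =====
-- the module constant 'weekend'
def pyWeekend : List String := ["sat", "sun"]

-- A: per-day loop over week_date updating three running totals, branching on the program and the day
def get_stay_cost (week_date : List String) (fidelity_program : String) : List (String × Int) :=
  let t := week_date.foldl
    (fun (t : Int × Int × Int) day =>
      if fidelity_program == "Rewards" then
        if pyWeekend.contains day then (t.1 + 80, t.2.1 + 50, t.2.2 + 40)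
        else (t.1 + 80, t.2.1 + 110, t.2.2 + 100)
      else
        if pyWeekend.contains day then (t.1 + 90, t.2.1 + 60, t.2.2 + 150)
        else (t.1 + 110, t.2.1 + 160, t.2.2 + 220))
    (0, 0, 0)
  [("Lakewood", t.1), ("Bridgewood", t.2.1), ("Ridgewood", t.2.2)]

-- ===== PORT B =====
-- B: choose the table once, count weekend days once, closed-form totals via a map over the table
def get_stay_cost_alt (week_date : List String) (fidelity_program : String) : List (String × Int) :=
  let rates : List (String × Int × Int) :=
    if fidelity_program == "Rewards" then
      [("Lakewood", (80, 80)), ("Bridgewood", (110, 50)), ("Ridgewood", (100, 40))]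
    else
      [("Lakewood", (110, 90)), ("Bridgewood", (160, 60)), ("Ridgewood", (220, 150))]
  let weekend_days : Int := (week_date.filter (fun day => pyWeekend.contains day)).length
  let weekday_days : Int := (week_date.length : Int) - weekend_days
  rates.map (fun p => (p.1, p.2.1 * weekday_days + p.2.2 * weekend_days))

-- ===== PRECONDITION & SPEC =====
def Spec_get_stay_cost (week_date : List String) (fidelity_program : String) (out : List (String × Int)) : Prop := out = get_stay_cost_alt week_date fidelity_program
instance (week_date : List String) (fidelity_program : String) (out : List (String × Int)) : Decidable (Spec_get_stay_cost week_date fidelity_program out) := by unfold Spec_get_stay_cost; infer_instance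

-- ===== CLAIM (what is proved, stated in full; the proofs are below) =====
def Claim_equal_get_stay_cost : Prop := ∀ (week_date : List String) (fidelity_program : String), Dom_get_stay_cost week_date fidelity_program → Spec_get_stay_cost week_date fidelity_program (get_stay_cost week_date fidelity_program)

-- ===== LEMMAS AND PROOFS =====

-- A's loop with per-branch increments (x_, y_) equals closed-form totals from the weekend count
theorem fold_closed (x1 x2 x3 y1 y2 y3 : Int) (p : String → Bool) :
    ∀ (wd : List String) (a b c : Int),
      wd.foldl (fun (t : Int × Int × Int) day =>
        if p day then (t.1 + y1, t.2.1 + y2, t.2.2 + y3)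
        else (t.1 + x1, t.2.1 + x2, t.2.2 + x3)) (a, b, c)
      = (a + x1 * ((wd.length : Int) - (wd.filter p).length) + y1 * (wd.filter p).length,
         b + x2 * ((wd.length : Int) - (wd.filter p).length) + y2 * (wd.filter p).length,
         c + x3 * ((wd.length : Int) - (wd.filter p).length) + y3 * (wd.filter p).length) := by
  intro wd
  induction wd with
  | nil => intro a b c; simp
  | cons d tl ih =>
    intro a b c
    by_cases h : p d = true <;>
      simp [List.foldl_cons, h, ih, Prod.ext_iff] <;>
      refine ⟨by ring, by ring, by ring⟩

theorem get_stay_cost_eq (week_date : List String) (fidelity_program : String) :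
    get_stay_cost week_date fidelity_program = get_stay_cost_alt week_date fidelity_program := by
  unfold get_stay_cost get_stay_cost_alt
  by_cases h : (fidelity_program == "Rewards") = true
  · simp only [h, if_true]
    rw [fold_closed 80 110 100 80 50 40]
    simp only [zero_add]; rfl
  · simp only [h, if_false, Bool.false_eq_true]
    rw [fold_closed 110 160 220 90 60 150]
    simp only [zero_add]; rfl

-- ===== VERDICT (by name: the statement is the Claim_ definition above) =====
theorem get_stay_cost_spec : Claim_equal_get_stay_cost := by
  intro wd fp _
  exact get_stay_cost_eq wd fp
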